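-- pv_equiv track=rewrite | github.com/thenaterhood/subproject | project/thenaterhood/csv.py | unsanitizeString
-- ===== SOURCE A (Python) =====
-- def unsanitizeString( clean ):
-- 	"""
-- 	Reverses the CSV sanitization on a string
--
-- 	Arguments:
-- 		clean - the sanitized string
-- 	"""
-- 	dirty = ""
-- 	clean = str( clean )
--
-- 	prev_c = ""
-- 	for c in clean:
--
-- 		if ( c == '"' and c == prev_c ):
-- 			pass
-- 		else:
-- 			dirty += c
--
-- 		prev_c = c
--
-- 	return dirty[1:len(dirty)]
-- ===== SOURCE B (Python) =====
-- def unsanitizeString(clean):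
--     """
--     Reverses the CSV sanitization on a string: collapse each maximal run of
--     double-quotes to a single quote, then drop the first character.
--     """
--     s = str(clean)
--     out = []
--     i = 0
--     n = len(s)
--     while i < n:
--         if s[i] == '"':
--             out.append('"')
--             while i < n and s[i] == '"':
--                 i += 1
--         else:
--             out.append(s[i])
--             i += 1
--     return "".join(out[1:])
-- ===== Notes on version B (the rewrite author's own statement) =====
-- stated objective: alternative
-- what changed: B replaces A's one-char-at-a-time loop with a carried prev_c state by a run-based scan: on a quote it emits one quote and skips the whole maximal quote run with an inner index loop, and drops the leading element of the output list instead of slicing the built string.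
import Mathlib
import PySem

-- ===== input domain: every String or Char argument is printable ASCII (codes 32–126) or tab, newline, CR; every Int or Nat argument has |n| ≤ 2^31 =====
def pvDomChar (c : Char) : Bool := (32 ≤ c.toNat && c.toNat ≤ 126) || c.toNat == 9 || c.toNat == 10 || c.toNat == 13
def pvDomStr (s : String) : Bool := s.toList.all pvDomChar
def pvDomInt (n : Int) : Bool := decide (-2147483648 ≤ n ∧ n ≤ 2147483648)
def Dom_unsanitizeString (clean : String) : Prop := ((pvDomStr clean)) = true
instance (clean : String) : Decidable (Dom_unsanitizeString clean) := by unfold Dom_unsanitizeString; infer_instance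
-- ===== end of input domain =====

-- B replaces A's char-by-char loop carrying prev_c with a run-skipping scan; objective: alternative (same cost).

-- ===== PORT A =====
-- the for-loop of A: state (dirty, prev_c); prev_c = "" is modelled as none, otherwise some c (exact: c == prev_c iff prev = some c)
def pvALoop (cs : List Char) (dirty : List Char) (prev : Option Char) : List Char :=
  match cs with
  | [] => dirty
  | c :: rest =>
      pvALoop rest (if c = '"' ∧ prev = some c then dirty else dirty ++ [c]) (some c)

def unsanitizeString (clean : String) : String :=
  -- str(clean) is the identity on a String argument; dirty[1:len(dirty)] = drop 1 (exact, indices non-negative)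
  String.ofList ((pvALoop clean.toList [] none).drop 1)

-- ===== PORT B =====
-- the outer while-loop of B: emit one '"' and skip the maximal quote run (inner while = dropWhile), else emit the char
def pvBScan (cs : List Char) : List Char :=
  match cs with
  | [] => []
  | c :: rest =>
      if c = '"' then '"' :: pvBScan (rest.dropWhile (· = '"'))
      else c :: pvBScan rest
termination_by cs.length
decreasing_by
  · simpa using Nat.lt_succ_of_le (List.length_dropWhile_le (· = '"') rest)
  · simp

def unsanitizeString_alt (clean : String) : String :=
  -- "".join(out[1:]) = drop the first collected element, then join
  String.ofList ((pvBScan clean.toList).drop 1)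

-- ===== PRECONDITION & SPEC =====
def Spec_unsanitizeString (clean : String) (out : String) : Prop := out = unsanitizeString_alt clean
instance (clean : String) (out : String) : Decidable (Spec_unsanitizeString clean out) := by unfold Spec_unsanitizeString; infer_instance

-- ===== CLAIM (what is proved, stated in full; the proofs are below) =====
def Claim_equal_unsanitizeString : Prop := ∀ (clean : String), Dom_unsanitizeString clean → Spec_unsanitizeString clean (unsanitizeString clean)

-- ===== LEMMAS AND PROOFS =====

-- A's loop, started with prev ≠ '"', produces acc ++ B's scan; started just after a quote it first
-- drops the leading quotes (both statements proved together by induction on a length bound).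
theorem pvALoop_eq_scan (n : ℕ) : ∀ (l acc : List Char), l.length ≤ n →
    (pvALoop l acc (some '"') = acc ++ pvBScan (l.dropWhile (· = '"'))) ∧
    (∀ prev : Option Char, prev ≠ some '"' → pvALoop l acc prev = acc ++ pvBScan l) := by
  induction n with
  | zero =>
      intro l acc hl
      have : l = [] := List.eq_nil_of_length_eq_zero (Nat.le_zero.mp hl)
      subst this
      simp [pvALoop, pvBScan]
  | succ n ih =>
      intro l acc hl
      cases l with
      | nil => simp [pvALoop, pvBScan]
      | cons c rest =>
          have hrest : rest.length ≤ n := by simpa using Nat.succ_le_succ_iff.mp hl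
          constructor
          · by_cases hc : c = '"'
            · subst hc
              have h1 := (ih rest acc hrest).1
              simp only [pvALoop, and_self, ite_true]
              rw [h1]
              simp
            · have h2 := (ih rest (acc ++ [c]) hrest).2 (some c) (by simpa using hc)
              simp only [pvALoop, List.dropWhile_cons]
              rw [if_neg (by simp [hc])]
              simp [pvBScan, hc, h2]
          · intro prev hprev
            by_cases hc : c = '"'
            · subst hc
              have h1 := (ih rest (acc ++ ['"']) hrest).1
              simp only [pvALoop]
              rw [if_neg (by rintro ⟨-, h2⟩; exact hprev h2)]
              rw [h1]
              simp [pvBScan]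
            · have h2 := (ih rest (acc ++ [c]) hrest).2 (some c) (by simpa using hc)
              simp only [pvALoop]
              rw [if_neg (by simp [hc])]
              simp [pvBScan, hc, h2]

-- ===== VERDICT (by name: the statement is the Claim_ definition above) =====
theorem unsanitizeString_spec : Claim_equal_unsanitizeString := by
  intro clean _
  unfold Spec_unsanitizeString unsanitizeString unsanitizeString_alt
  have h := (pvALoop_eq_scan clean.toList.length clean.toList [] le_rfl).2 none (by simp)
  rw [h]
  simp
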